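-- pv_equiv track=rewrite | github.com/miliar/Code_Jam_Webscraper | solutions_python/solutions_year17_round2_nr2/630.py | answer
-- ===== SOURCE A (Python) =====
-- def answer(left, horses, colors):
--     copy = horses[:]
--     m = max(copy)
--     copy.remove(m)
--     if sum(copy) < m:
--         return "IMPOSSIBLE"
--     else:
--         i = horses.index(m)
--         max_color = colors[i]
--         colors = colors.replace(max_color, 'z')
--         horses = list(map(list, zip(horses, colors)))
--         horses.sort(reverse=True)
--         i = 0
--         stables = [horses[i][1]]
--         left -= 1
--         horses[i][0] -= 1
--
--     for _ in range(left):
--         horses.sort(reverse=True)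
--
--         i = 0 if stables[-1] != horses[0][1] else 1
--
--         if horses[i][0] == 0:
--             return "IMPOSSIBLE"
--         else:
--             stables.append(horses[i][1])
--             horses[i][0] -= 1
--
--     return "".join(stables).replace('z', max_color)
-- ===== SOURCE B (Python) =====
-- def answer(left, horses, colors):
--     m = max(horses)
--     if sum(horses) - m < m:
--         return "IMPOSSIBLE"
--     max_color = colors[horses.index(m)]
--     masked = colors.replace(max_color, 'z')
--
--     # skew max-heap: node = (count, color, left_child, right_child) or None
--     def merge(a, b):
--         if a is None:
--             return b
--         if b is None:
--             return a
--         if (a[0], a[1]) < (b[0], b[1]):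
--             a, b = b, a
--         return (a[0], a[1], merge(a[3], b), a[2])
--
--     heap = None
--     for c, ch in zip(horses, masked):
--         heap = merge(heap, (c, ch, None, None))
--
--     cnt, ch, l, r = heap          # first stall: unconditional, like the problem's first pick
--     out = [ch]
--     last = ch
--     heap = merge(merge(l, r), (cnt - 1, ch, None, None))
--
--     for _ in range(left - 1):
--         cnt, ch, l, r = heap
--         rest = merge(l, r)
--         if ch == last:
--             cnt2, ch2, l2, r2 = rest
--             if cnt2 == 0:
--                 return "IMPOSSIBLE"
--             out.append(ch2)
--             heap = merge(merge(merge(l2, r2), (cnt2 - 1, ch2, None, None)),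
--                          (cnt, ch, None, None))
--             last = ch2
--         else:
--             if cnt == 0:
--                 return "IMPOSSIBLE"
--             out.append(ch)
--             heap = merge(rest, (cnt - 1, ch, None, None))
--             last = ch
--     return "".join(out).replace('z', max_color)
-- ===== Notes on version B (the rewrite author's own statement) =====
-- stated objective: alternative
-- what changed: Replaces A's greedy that re-sorts the whole (count,color) list before every pick with a skew max-heap (a mergeable heap-ordered binary tree): each stall pops the heap root (or, when its color equals the last placed one, the root of the merged children), decrements and re-inserts via heap merges, so no list is ever sorted after the setup.
import Mathlib
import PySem

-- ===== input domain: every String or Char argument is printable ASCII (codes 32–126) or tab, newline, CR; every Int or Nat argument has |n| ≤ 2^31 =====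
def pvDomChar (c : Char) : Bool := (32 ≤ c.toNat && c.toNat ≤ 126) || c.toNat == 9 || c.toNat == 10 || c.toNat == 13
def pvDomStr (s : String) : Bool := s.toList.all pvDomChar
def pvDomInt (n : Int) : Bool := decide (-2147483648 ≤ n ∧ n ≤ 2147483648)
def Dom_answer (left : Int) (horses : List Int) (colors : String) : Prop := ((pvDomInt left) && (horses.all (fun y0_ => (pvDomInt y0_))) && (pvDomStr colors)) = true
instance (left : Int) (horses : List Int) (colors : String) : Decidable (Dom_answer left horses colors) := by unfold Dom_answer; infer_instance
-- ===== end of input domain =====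

-- B replaces A's sort-the-whole-list-before-every-pick greedy by a skew max-heap
-- (a mergeable heap-ordered binary tree): pop the root (or the root of the merged
-- children when its color equals the last placed one), decrement and re-insert.
-- Same return value wherever A returns (a different algorithm; speed not claimed).

-- ===== PORT A =====
-- the loop 'for _ in range(left)': sort desc, pick index 0 (or 1 if top color equals the
-- last stalled color), return IMPOSSIBLE when the picked count is 0, else place and decrement.
-- On inputs where the Python raises IndexError (index 1 of a 1-element list) Pre_answer is
-- false; there the port's getD default makes it return some harmless value.
def loopA : Nat → List (Int × Char) → List Char → Option (List Char)
  | 0, _, st => some st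
  | Nat.succ n, hs, st =>
    let s := PySem.List.sorted2 hs Prod.fst Prod.snd true
    let i : Nat := if st.getLast? ≠ some (s.headD (0, ' ')).2 then 0 else 1
    let pick := s.getD i (0, ' ')
    if pick.1 = 0 then none
    else loopA n (s.set i (pick.1 - 1, pick.2)) (st ++ [pick.2])

def answer (left : Int) (horses : List Int) (colors : String) : String :=
  match PySem.List.max? horses (fun x => x) with
  | none => ""            -- max([]) raises ValueError: outside Pre_answer
  | some m =>
    let copy := (PySem.List.remove? horses m).getD horses
    if copy.sum < m then "IMPOSSIBLE"
    else
      let i : Nat := (PySem.List.index? horses m).getD 0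
      match PySem.Str.pyGet? colors (i : Int) with
      | none => ""        -- colors[i] raises IndexError: outside Pre_answer
      | some mc =>
        let colors2 := PySem.Str.replace colors (String.singleton mc) "z"
        let pairs := List.zip horses colors2.toList
        match PySem.List.sorted2 pairs Prod.fst Prod.snd true with
        | [] => ""        -- horses[0] raises IndexError: outside Pre_answer
        | p :: rest =>
          match loopA (left - 1).toNat ((p.1 - 1, p.2) :: rest) [p.2] with
          | none => "IMPOSSIBLE"
          | some st => PySem.Str.replace (String.ofList st) "z" (String.singleton mc)

-- ===== PORT B =====
-- skew max-heap: a heap-ordered binary tree, node = (count, color, left, right);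
-- merge is the standard skew merge (larger root wins, children swapped).
inductive Heap : Type
  | leaf : Heap
  | node : Int → Char → Heap → Heap → Heap
deriving DecidableEq, Repr

-- python's  merge(a, b)  (tuple comparison (count, color) = the lexicographic order toLex)
def hmerge : Heap → Heap → Heap
  | .leaf, b => b
  | .node c1 h1 l1 r1, .leaf => .node c1 h1 l1 r1
  | .node c1 h1 l1 r1, .node c2 h2 l2 r2 =>
    if toLex ((c1, h1) : Int × Char) < toLex ((c2, h2) : Int × Char) then
      .node c2 h2 (hmerge r2 (.node c1 h1 l1 r1)) l2
    else
      .node c1 h1 (hmerge r1 (.node c2 h2 l2 r2)) l1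
termination_by a b => sizeOf a + sizeOf b

-- the loop 'for _ in range(left - 1)' of Source B; where Source B raises on unpacking an
-- empty heap (outside Pre_answer) the port returns a harmless default.
def loopB : Nat → Heap → List Char → Char → Option (List Char)
  | 0, _, out, _ => some out
  | Nat.succ _, .leaf, out, _ => some out     -- Python raises here: outside Pre_answer
  | Nat.succ n, .node cnt ch l r, out, last =>
    let rest := hmerge l r
    if ch = last then
      match rest with
      | .leaf => some out                      -- Python raises here: outside Pre_answer
      | .node cnt2 ch2 l2 r2 =>
        if cnt2 = 0 then none
        else loopB n (hmerge (hmerge (hmerge l2 r2) (.node (cnt2 - 1) ch2 .leaf .leaf))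
                             (.node cnt ch .leaf .leaf))
                   (out ++ [ch2]) ch2
    else
      if cnt = 0 then none
      else loopB n (hmerge rest (.node (cnt - 1) ch .leaf .leaf)) (out ++ [ch]) ch

def answer_alt (left : Int) (horses : List Int) (colors : String) : String :=
  match PySem.List.max? horses (fun x => x) with
  | none => ""            -- max([]) raises ValueError: outside Pre_answer
  | some m =>
    if horses.sum - m < m then "IMPOSSIBLE"
    else
      let i : Nat := (PySem.List.index? horses m).getD 0
      match PySem.Str.pyGet? colors (i : Int) with
      | none => ""        -- colors[i] raises IndexError: outside Pre_answer
      | some mc =>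
        let masked := PySem.Str.replace colors (String.singleton mc) "z"
        let heap0 := (List.zip horses masked.toList).foldl
            (fun h p => hmerge h (Heap.node p.1 p.2 .leaf .leaf)) Heap.leaf
        match heap0 with
        | .leaf => ""     -- unpacking an empty heap raises: outside Pre_answer
        | .node cnt ch l r =>
          match loopB (left - 1).toNat
              (hmerge (hmerge l r) (Heap.node (cnt - 1) ch .leaf .leaf)) [ch] ch with
          | none => "IMPOSSIBLE"
          | some out => PySem.Str.replace (String.ofList out) "z" (String.singleton mc)

-- ===== PRECONDITION & SPEC =====
-- Pre_answer holds exactly where the Python A returns normally: horses must be nonempty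
-- (max([]) raises), and when the sum test passes (sum(horses) ≥ 2*max) the index of the
-- maximum must be inside colors (else colors[i] raises IndexError) and, if left ≥ 2 so the
-- loop runs, both lists must have at least two entries (else horses[1] raises IndexError).
def Pre_answer (left : Int) (horses : List Int) (colors : String) : Prop :=
  horses ≠ [] ∧
  (2 * ((horses.max?).getD 0) ≤ horses.sum →
    (horses.idxOf ((horses.max?).getD 0) < colors.toList.length ∧
     (2 ≤ left → 2 ≤ horses.length ∧ 2 ≤ colors.toList.length)))
instance (left : Int) (horses : List Int) (colors : String) : Decidable (Pre_answer left horses colors) := by unfold Pre_answer; infer_instance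
def pvWitness_answer : Int × List Int × String := (2, [2, 2], "ab")

def Spec_answer (left : Int) (horses : List Int) (colors : String) (out : String) : Prop := out = answer_alt left horses colors
instance (left : Int) (horses : List Int) (colors : String) (out : String) : Decidable (Spec_answer left horses colors out) := by unfold Spec_answer; infer_instance

-- ===== CLAIM (what is proved, stated in full; the proofs are below) =====
def Claim_equal_answer : Prop := ∀ (left : Int) (horses : List Int) (colors : String), Dom_answer left horses colors → Pre_answer left horses colors → Spec_answer left horses colors (answer left horses colors)

-- ===== LEMMAS AND PROOFS =====
set_option maxHeartbeats 1000000

-- Python's tuple comparison: the combined (k1,k2) test of sorted2 is the Lex order.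
theorem pvLexBool (a b : Int × Char) :
    (decide (a.1 < b.1) || (!decide (b.1 < a.1) && decide (a.2 < b.2)))
      = decide (toLex a < toLex b) := by
  by_cases h1 : a.1 < b.1 <;> by_cases h2 : b.1 < a.1 <;> by_cases h3 : a.2 < b.2 <;>
    simp [h1, h2, h3, Prod.Lex.lt_iff] <;> omega

theorem pvSorted2_eq (xs : List (Int × Char)) (rev : Bool) :
    PySem.List.sorted2 xs Prod.fst Prod.snd rev
      = PySem.List.sorted xs (fun p => toLex p) rev := by
  unfold PySem.List.sorted2 PySem.List.sorted
  cases rev <;> simp only [if_true, if_false, Bool.false_eq_true] <;>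
    congr 1 <;> funext acc x <;> congr 1 <;> funext a b <;> rw [pvLexBool]

-- ----- skew-heap machinery -----

def Heap.toL : Heap → List (Int × Char)
  | .leaf => []
  | .node c h l r => (c, h) :: (l.toL ++ r.toL)

def HeapOrd : Heap → Prop
  | .leaf => True
  | .node c h l r =>
      (∀ p ∈ l.toL ++ r.toL, toLex p ≤ toLex ((c, h) : Int × Char)) ∧ HeapOrd l ∧ HeapOrd r

theorem pvMerge_toL (a b : Heap) : (hmerge a b).toL.Perm (a.toL ++ b.toL) := by
  induction a, b using hmerge.induct with
  | case1 b => simp [hmerge, Heap.toL]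
  | case2 c1 h1 l1 r1 => simp [hmerge, Heap.toL]
  | case3 c1 h1 l1 r1 c2 h2 l2 r2 hlt ih =>
    rw [hmerge, if_pos hlt]
    refine List.perm_iff_count.mpr fun a => ?_
    have h1 := List.perm_iff_count.mp ih a
    simp only [Heap.toL, List.count_append, List.count_cons] at *
    split_ifs at * <;> omega
  | case4 c1 h1 l1 r1 c2 h2 l2 r2 hlt ih =>
    rw [hmerge, if_neg hlt]
    refine List.perm_iff_count.mpr fun a => ?_
    have h1 := List.perm_iff_count.mp ih a
    simp only [Heap.toL, List.count_append, List.count_cons] at *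
    split_ifs at * <;> omega

theorem pvBound_of_heapOrd (c : Int) (h : Char) (l r : Heap)
    (H : HeapOrd (.node c h l r)) :
    ∀ p ∈ (Heap.node c h l r).toL, toLex p ≤ toLex ((c, h) : Int × Char) := by
  intro p hp
  simp only [Heap.toL, List.mem_cons] at hp
  rcases hp with rfl | hp
  · exact le_refl _
  · exact H.1 p hp

theorem pvMerge_heapOrd (a b : Heap) : HeapOrd a → HeapOrd b → HeapOrd (hmerge a b) := by
  induction a, b using hmerge.induct with
  | case1 b => intro _ hb; simpa [hmerge]
  | case2 c1 h1 l1 r1 => intro ha _; simpa [hmerge]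
  | case3 c1 h1 l1 r1 c2 h2 l2 r2 hlt ih =>
    intro ha hb
    rw [hmerge, if_pos hlt]
    refine ⟨?_, ih hb.2.2 ha, hb.2.1⟩
    intro p hp
    rcases List.mem_append.mp hp with hp | hp
    · rcases List.mem_append.mp ((pvMerge_toL r2 (.node c1 h1 l1 r1)).mem_iff.mp hp) with h' | h'
      · exact hb.1 p (List.mem_append.mpr (Or.inr h'))
      · exact le_trans (pvBound_of_heapOrd c1 h1 l1 r1 ha p h') (le_of_lt hlt)
    · exact hb.1 p (List.mem_append.mpr (Or.inl hp))
  | case4 c1 h1 l1 r1 c2 h2 l2 r2 hlt ih =>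
    intro ha hb
    rw [hmerge, if_neg hlt]
    have hle : toLex ((c2, h2) : Int × Char) ≤ toLex ((c1, h1) : Int × Char) := le_of_not_gt hlt
    refine ⟨?_, ih ha.2.2 hb, ha.2.1⟩
    intro p hp
    rcases List.mem_append.mp hp with hp | hp
    · rcases List.mem_append.mp ((pvMerge_toL r1 (.node c2 h2 l2 r2)).mem_iff.mp hp) with h' | h'
      · exact ha.1 p (List.mem_append.mpr (Or.inr h'))
      · exact le_trans (pvBound_of_heapOrd c2 h2 l2 r2 hb p h') hle
    · exact ha.1 p (List.mem_append.mpr (Or.inl hp))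

theorem pvBuild_toL (pool : List (Int × Char)) : ∀ (h : Heap),
    (pool.foldl (fun h p => hmerge h (Heap.node p.1 p.2 .leaf .leaf)) h).toL.Perm
      (h.toL ++ pool) := by
  induction pool with
  | nil => intro h; simp
  | cons q t ih =>
    intro h
    simp only [List.foldl_cons]
    refine (ih _).trans ?_
    refine List.perm_iff_count.mpr fun a => ?_
    have h1 := List.perm_iff_count.mp (pvMerge_toL h (Heap.node q.1 q.2 .leaf .leaf)) a
    simp only [Heap.toL, List.count_append, List.count_cons, List.count_nil] at *
    split_ifs at * <;> omega

theorem pvBuild_heapOrd (pool : List (Int × Char)) : ∀ (h : Heap), HeapOrd h →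
    HeapOrd (pool.foldl (fun h p => hmerge h (Heap.node p.1 p.2 .leaf .leaf)) h) := by
  induction pool with
  | nil => intro h hh; exact hh
  | cons q t ih =>
    intro h hh
    refine ih _ (pvMerge_heapOrd _ _ hh ?_)
    exact ⟨by simp [Heap.toL], trivial, trivial⟩

-- head of any key-descending arrangement is the root of any heap holding the same multiset
theorem pvRoot_eq (c : Int) (ch : Char) (l r : Heap) (m : Int × Char) (t : List (Int × Char))
    (hp : (Heap.node c ch l r).toL.Perm (m :: t))
    (hb : ∀ p ∈ m :: t, toLex p ≤ toLex m)
    (H : HeapOrd (.node c ch l r)) : ((c, ch) : Int × Char) = m := by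
  have h1 : toLex ((c, ch) : Int × Char) ≤ toLex m :=
    hb _ (hp.subset (by simp [Heap.toL]))
  have h2 : toLex m ≤ toLex ((c, ch) : Int × Char) :=
    pvBound_of_heapOrd c ch l r H m (hp.symm.subset List.mem_cons_self)
  exact toLex.injective (le_antisymm h1 h2)

theorem pvPairwiseBound (m : Int × Char) (t : List (Int × Char))
    (hpw : List.Pairwise (fun a b : Int × Char => toLex b ≤ toLex a) (m :: t)) :
    ∀ p ∈ m :: t, toLex p ≤ toLex m := by
  intro p hp
  rcases List.mem_cons.mp hp with rfl | hp
  · exact le_refl _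
  · exact (List.pairwise_cons.mp hpw).1 p hp

-- the two loops agree given Perm states, the heap invariant, length ≥ 2 and the last char
theorem pvLoop_eq (n : Nat) : ∀ (hs : List (Int × Char)) (hp : Heap) (st : List Char) (last : Char),
    hs.Perm hp.toL → HeapOrd hp → 2 ≤ hs.length → st.getLast? = some last →
    loopA n hs st = loopB n hp st last := by
  induction n with
  | zero => intro hs hp st last _ _ _ _; rfl
  | succ n ih =>
    intro hs hp st last hperm hord hlen hlast
    have hslen : (PySem.List.sorted hs (fun p => toLex p) true).length = hs.length :=
      PySem.List.length_sorted hs _ true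
    obtain ⟨m, m2, t2, hs_eq⟩ : ∃ m m2 t2,
        PySem.List.sorted hs (fun p => toLex p) true = m :: m2 :: t2 := by
      cases h : PySem.List.sorted hs (fun p => toLex p) true with
      | nil =>
        rw [h] at hslen
        have : hs.length = 0 := by simpa using hslen.symm
        omega
      | cons a ll =>
        cases ll with
        | nil =>
          rw [h] at hslen
          have : hs.length = 1 := by simpa using hslen.symm
          omega
        | cons b l2 => exact ⟨a, b, l2, rfl⟩
    have hpw : List.Pairwise (fun a b : Int × Char => toLex b ≤ toLex a) (m :: m2 :: t2) := by
      rw [← hs_eq]; exact PySem.List.sorted_pairwise_rev hs _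
    have hsp : List.Perm (m :: m2 :: t2) hs := by
      rw [← hs_eq]; exact PySem.List.sorted_perm hs _ true
    obtain ⟨c, ch, l, r, rfl⟩ : ∃ c ch l r, hp = Heap.node c ch l r := by
      cases hp with
      | leaf =>
        exfalso
        have h0 := hperm.length_eq
        simp only [Heap.toL, List.length_nil] at h0
        omega
      | node c ch l r => exact ⟨c, ch, l, r, rfl⟩
    have hptoL : (Heap.node c ch l r).toL.Perm (m :: m2 :: t2) :=
      hperm.symm.trans hsp.symm
    have hroot : ((c, ch) : Int × Char) = m :=
      pvRoot_eq c ch l r m (m2 :: t2) hptoL (pvPairwiseBound m (m2 :: t2) hpw) hord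
    have hchild : (l.toL ++ r.toL).Perm (m2 :: t2) := by
      have h1 : ((c, ch) :: (l.toL ++ r.toL)).Perm (m :: m2 :: t2) := by
        simpa [Heap.toL] using hptoL
      rw [hroot] at h1
      exact h1.cons_inv
    subst hroot
    show loopA (n+1) hs st = loopB (n+1) (Heap.node c ch l r) st last
    rw [loopA]
    simp only [pvSorted2_eq, hs_eq]
    rw [loopB]
    by_cases hc : ch = last
    · -- blocked: pick index 1 / root of the merged children
      rw [if_neg (show ¬ st.getLast? ≠ some (((c, ch) :: (m2 :: t2)).headD (0, ' ')).2 by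
        simp [hlast, hc]), if_pos hc]
      have hrest_perm : (hmerge l r).toL.Perm (m2 :: t2) := (pvMerge_toL l r).trans hchild
      have hrest_ord : HeapOrd (hmerge l r) := pvMerge_heapOrd l r hord.2.1 hord.2.2
      obtain ⟨c2, ch2, l2, r2, hrest_eq⟩ : ∃ c2 ch2 l2 r2,
          hmerge l r = Heap.node c2 ch2 l2 r2 := by
        cases hre : hmerge l r with
        | leaf =>
          have := hrest_perm.length_eq
          rw [hre] at this; simp [Heap.toL] at this
        | node a b x y => exact ⟨a, b, x, y, rfl⟩
      rw [hrest_eq] at hrest_perm hrest_ord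
      have hroot2 : ((c2, ch2) : Int × Char) = m2 :=
        pvRoot_eq c2 ch2 l2 r2 m2 t2 hrest_perm
          (pvPairwiseBound m2 t2 (List.pairwise_cons.mp hpw).2) hrest_ord
      have hchild2 : (l2.toL ++ r2.toL).Perm t2 := by
        have h1 : ((c2, ch2) :: (l2.toL ++ r2.toL)).Perm (m2 :: t2) := by
          simpa [Heap.toL] using hrest_perm
        rw [hroot2] at h1
        exact h1.cons_inv
      subst hroot2
      rw [hrest_eq]
      simp only [List.getD, List.getElem?_cons_succ, List.getElem?_cons_zero, Option.getD_some]
      by_cases hz : c2 = 0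
      · simp [hz]
      · rw [if_neg hz, if_neg hz]
        have hset : ((c, ch) :: (c2, ch2) :: t2).set 1 ((c2 - 1, ch2))
            = (c, ch) :: (c2 - 1, ch2) :: t2 := rfl
        rw [hset]
        refine ih _ _ _ _ ?_ ?_ ?_ ?_
        · -- permutation of the new states
          have e1 := pvMerge_toL (hmerge (hmerge l2 r2) (Heap.node (c2 - 1) ch2 .leaf .leaf))
            (Heap.node c ch .leaf .leaf)
          have e2 := pvMerge_toL (hmerge l2 r2) (Heap.node (c2 - 1) ch2 .leaf .leaf)
          have e3 := pvMerge_toL l2 r2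
          refine List.perm_iff_count.mpr fun a => ?_
          have k1 := List.perm_iff_count.mp e1 a
          have k2 := List.perm_iff_count.mp e2 a
          have k3 := List.perm_iff_count.mp e3 a
          have k4 := List.perm_iff_count.mp hchild2 a
          simp only [Heap.toL, List.count_append, List.count_cons, List.count_nil] at *
          split_ifs at * <;> omega
        · refine pvMerge_heapOrd _ _ (pvMerge_heapOrd _ _ (pvMerge_heapOrd _ _
            hrest_ord.2.1 hrest_ord.2.2) ?_) ?_ <;> exact ⟨by simp [Heap.toL], trivial, trivial⟩
        · have := (pvMerge_toL (hmerge (hmerge l2 r2) (Heap.node (c2 - 1) ch2 .leaf .leaf))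
            (Heap.node c ch .leaf .leaf)).length_eq
          have h2 := (pvMerge_toL (hmerge l2 r2) (Heap.node (c2 - 1) ch2 .leaf .leaf)).length_eq
          have h3 := (pvMerge_toL l2 r2).length_eq
          have h4 := hchild2.length_eq
          have h5 := hslen
          rw [hs_eq] at h5
          simp only [Heap.toL, List.length_append, List.length_cons, List.length_nil] at *
          omega
        · simp
    · -- free: pick index 0 / the root
      rw [if_pos (show st.getLast? ≠ some (((c, ch) :: (m2 :: t2)).headD (0, ' ')).2 by
        simp only [List.headD_cons, hlast, ne_eq, Option.some.injEq]
        exact fun h => hc h.symm), if_neg hc]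
      simp only [List.getD, List.getElem?_cons_zero, Option.getD_some, List.set]
      by_cases hz : c = 0
      · simp [hz]
      · rw [if_neg hz, if_neg hz]
        refine ih _ _ _ _ ?_ ?_ ?_ ?_
        · have e1 := pvMerge_toL (hmerge l r) (Heap.node (c - 1) ch .leaf .leaf)
          have e2 := pvMerge_toL l r
          refine List.perm_iff_count.mpr fun a => ?_
          have k1 := List.perm_iff_count.mp e1 a
          have k2 := List.perm_iff_count.mp e2 a
          have k3 := List.perm_iff_count.mp hchild a
          simp only [Heap.toL, List.count_append, List.count_cons, List.count_nil] at *
          split_ifs at * <;> omega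
        · exact pvMerge_heapOrd _ _ (pvMerge_heapOrd _ _ hord.2.1 hord.2.2)
            ⟨by simp [Heap.toL], trivial, trivial⟩
        · have := (pvMerge_toL (hmerge l r) (Heap.node (c - 1) ch .leaf .leaf)).length_eq
          have h2 := (pvMerge_toL l r).length_eq
          have h3 := hchild.length_eq
          have h5 := hslen
          rw [hs_eq] at h5
          simp only [Heap.toL, List.length_append, List.length_cons, List.length_nil] at *
          omega
        · simp

theorem pvReplaceGo (o n : Char) : ∀ (fuel : Nat) (l acc : List Char), l.length ≤ fuel →
    PySem.Chars.replace.go [o] [n] fuel l acc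
      = acc.reverse ++ l.map (fun c => if c = o then n else c) := by
  intro fuel
  induction fuel with
  | zero =>
    intro l acc h
    have : l = [] := List.eq_nil_of_length_eq_zero (by omega)
    subst this; simp [PySem.Chars.replace.go]
  | succ f ih =>
    intro l acc h
    cases l with
    | nil => simp [PySem.Chars.replace.go]
    | cons c t =>
      rw [PySem.Chars.replace.go]
      by_cases hc : c = o
      · have hpre : List.isPrefixOf [o] (c :: t) = true := by simp [List.isPrefixOf, hc]
        rw [if_pos hpre]
        simp only [List.length_cons] at h
        rw [ih _ _ (by simpa using Nat.le_of_succ_le_succ h)]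
        simp [hc]
      · have hpre : List.isPrefixOf [o] (c :: t) = false := by simp [List.isPrefixOf]; exact fun hh => hc hh.symm
        rw [if_neg (by simp [hpre])]
        rw [ih _ _ (by simp at h; omega)]
        simp [hc]

theorem pvReplaceSingle (cs : List Char) (o n : Char) :
    PySem.Chars.replace cs [o] [n] = cs.map (fun c => if c = o then n else c) := by
  rw [PySem.Chars.replace]
  simp only [List.isEmpty_cons, if_false, Bool.false_eq_true]
  exact pvReplaceGo o n cs.length cs [] (le_refl _)

theorem pvIdxOf? {xs : List Int} {v : Int} (h : v ∈ xs) : xs.idxOf? v = some (xs.idxOf v) := by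
  induction xs with
  | nil => simp at h
  | cons a t ih =>
    by_cases hv : a = v
    · subst hv; simp [List.idxOf?_cons]
    · rcases List.mem_cons.mp h with h' | h'
      · exact absurd h'.symm hv
      · simp [List.idxOf?_cons, hv, ih h']

-- ===== VERDICT (by name: the statement is the Claim_ definition above) =====
theorem answer_spec : Claim_equal_answer := by
  unfold Claim_equal_answer
  intro left horses colors _ hpre
  unfold Spec_answer answer answer_alt
  obtain ⟨hne, hrest⟩ := hpre
  obtain ⟨h, t, rfl⟩ : ∃ h t, horses = h :: t := by
    cases horses with
    | nil => exact absurd rfl hne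
    | cons a b => exact ⟨a, b, rfl⟩
  have hmax : PySem.List.max? (h :: t) (fun x => x) = some (t.foldl max h) :=
    PySem.List.max?_id_cons h t
  set M := t.foldl max h with hM
  have hM_mem : M ∈ h :: t := PySem.List.max?_mem hmax
  have hPreM : ((h :: t).max?).getD 0 = M := by rw [List.max?_cons']; rfl
  have hremove : PySem.List.remove? (h :: t) M = some ((h :: t).erase M) :=
    PySem.List.remove?_eq_some_erase _ M hM_mem
  have hsum : ((h :: t).erase M).sum = (h :: t).sum - M := by
    have hperm := List.perm_cons_erase hM_mem
    have := hperm.sum_eq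
    simp only [List.sum_cons] at this ⊢
    omega
  simp only [hmax, hremove, Option.getD_some, hsum]
  by_cases hIMP : (h :: t).sum - M < M
  · rw [if_pos hIMP, if_pos hIMP]
  · rw [if_neg hIMP, if_neg hIMP]
    rw [hPreM] at hrest
    obtain ⟨hcol, hlen2⟩ := hrest (by omega)
    have hidx : PySem.List.index? (h :: t) M = some ((h :: t).idxOf M) := by
      rw [PySem.List.index?_eq_idxOf?]; exact pvIdxOf? hM_mem
    simp only [hidx, Option.getD_some]
    set idx := (h :: t).idxOf M with hidxdef
    have hcol' : idx < colors.toList.length := hcol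
    have hget : PySem.Str.pyGet? colors ((idx : Nat) : Int) = some (colors.toList[idx]) := by
      rw [PySem.Str.pyGet?_eq, PySem.Chars.pyGet?_eq_listPyGet?, PySem.List.pyGet?_natCast]
      exact List.getElem?_eq_getElem hcol'
    rw [hget]
    dsimp only
    set mc := colors.toList[idx] with hmc
    set pairs := List.zip (h :: t) (PySem.Str.replace colors (String.singleton mc) "z").toList
      with hpairs
    have hrep : (PySem.Str.replace colors (String.singleton mc) "z").toList
        = colors.toList.map (fun c => if c = mc then 'z' else c) := by
      rw [PySem.Str.toList_replace]
      have h1 : (String.singleton mc).toList = [mc] := by simp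
      have h2 : ("z" : String).toList = ['z'] := by decide
      rw [h1, h2, pvReplaceSingle]
    have hplen : pairs.length = min (h :: t).length colors.toList.length := by
      rw [hpairs, List.length_zip, hrep, List.length_map]
    have hpne : pairs ≠ [] := by
      intro hnil
      rw [hnil] at hplen
      simp only [List.length_nil, List.length_cons] at hplen
      omega
    have hsne : PySem.List.sorted pairs (fun p => toLex p) true ≠ [] := by
      rw [Ne, PySem.List.sorted_eq_nil_iff]; exact hpne
    obtain ⟨p, rest, hsort⟩ : ∃ p rest, PySem.List.sorted pairs (fun p => toLex p) true = p :: rest := by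
      cases hx : PySem.List.sorted pairs (fun p => toLex p) true with
      | nil => exact absurd hx hsne
      | cons a b => exact ⟨a, b, rfl⟩
    have hsperm : List.Perm (p :: rest) pairs := by
      rw [← hsort]; exact PySem.List.sorted_perm pairs _ true
    have hspw : List.Pairwise (fun a b : Int × Char => toLex b ≤ toLex a) (p :: rest) := by
      rw [← hsort]; exact PySem.List.sorted_pairwise_rev pairs _
    clear_value pairs mc
    -- the built heap: contents = pairs, heap-ordered, root = p
    have hbperm0 : (pairs.foldl (fun hh q => hmerge hh (Heap.node q.1 q.2 .leaf .leaf))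
        Heap.leaf).toL.Perm pairs := by
      simpa only [Heap.toL, List.nil_append] using pvBuild_toL pairs Heap.leaf
    have hbord0 : HeapOrd (pairs.foldl (fun hh q => hmerge hh (Heap.node q.1 q.2 .leaf .leaf))
        Heap.leaf) := pvBuild_heapOrd pairs Heap.leaf trivial
    obtain ⟨c0, ch0, l0, r0, hnode⟩ : ∃ c0 ch0 l0 r0,
        pairs.foldl (fun hh q => hmerge hh (Heap.node q.1 q.2 .leaf .leaf)) Heap.leaf
          = Heap.node c0 ch0 l0 r0 := by
      cases hx : pairs.foldl (fun hh q => hmerge hh (Heap.node q.1 q.2 .leaf .leaf)) Heap.leaf with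
      | leaf =>
        have := hbperm0.length_eq
        rw [hx] at this
        simp only [Heap.toL, List.length_nil] at this
        exact absurd (List.eq_nil_of_length_eq_zero this.symm) hpne
      | node a b x y => exact ⟨a, b, x, y, rfl⟩
    rw [hnode] at hbperm0 hbord0
    have hbperm := hbperm0
    have hbord := hbord0
    have hroot : ((c0, ch0) : Int × Char) = p :=
      pvRoot_eq c0 ch0 l0 r0 p rest (hbperm.trans hsperm.symm)
        (pvPairwiseBound p rest hspw) hbord
    have hchild0 : (l0.toL ++ r0.toL).Perm rest := by
      have h1 : ((c0, ch0) :: (l0.toL ++ r0.toL)).Perm (p :: rest) := by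
        simpa [Heap.toL] using hbperm.trans hsperm.symm
      rw [hroot] at h1
      exact h1.cons_inv
    subst hroot
    rw [pvSorted2_eq, hsort, hnode]
    have hloop : loopA (left - 1).toNat ((c0 - 1, ch0) :: rest) [ch0]
        = loopB (left - 1).toNat
            (hmerge (hmerge l0 r0) (Heap.node (c0 - 1) ch0 .leaf .leaf)) [ch0] ch0 := by
      cases hn : (left - 1).toNat with
      | zero => rfl
      | succ k =>
        have hleft2 : 2 ≤ left := by omega
        obtain ⟨hhl, hcl⟩ := hlen2 hleft2
        refine pvLoop_eq (k + 1) _ _ _ _ ?_ ?_ ?_ rfl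
        · have e1 := pvMerge_toL (hmerge l0 r0) (Heap.node (c0 - 1) ch0 .leaf .leaf)
          have e2 := pvMerge_toL l0 r0
          refine List.perm_iff_count.mpr fun a => ?_
          have k1 := List.perm_iff_count.mp e1 a
          have k2 := List.perm_iff_count.mp e2 a
          have k3 := List.perm_iff_count.mp hchild0 a
          simp only [Heap.toL, List.count_append, List.count_cons, List.count_nil] at *
          split_ifs at * <;> omega
        · exact pvMerge_heapOrd _ _ (pvMerge_heapOrd _ _ hbord.2.1 hbord.2.2)
            ⟨by simp [Heap.toL], trivial, trivial⟩
        · have e1 := (pvMerge_toL (hmerge l0 r0) (Heap.node (c0 - 1) ch0 .leaf .leaf)).length_eq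
          have e2 := (pvMerge_toL l0 r0).length_eq
          have e3 := hchild0.length_eq
          have e4 := hsperm.length_eq
          rw [hplen] at e4
          simp only [Heap.toL, List.length_append, List.length_cons, List.length_nil] at *
          omega
    show (match loopA (left - 1).toNat ((c0 - 1, ch0) :: rest) [ch0] with
        | none => "IMPOSSIBLE"
        | some st => PySem.Str.replace (String.ofList st) "z" (String.singleton mc))
      = (match loopB (left - 1).toNat
            (hmerge (hmerge l0 r0) (Heap.node (c0 - 1) ch0 .leaf .leaf)) [ch0] ch0 with
        | none => "IMPOSSIBLE"
        | some out => PySem.Str.replace (String.ofList out) "z" (String.singleton mc))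
    rw [hloop]
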